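-- pv_equiv track=rewrite | github.com/manwar/perlweeklychallenge-club | challenge-175/roger-bell-west/python/ch-2.py | iteratedtotient
-- ===== SOURCE A (Python) =====
-- from math import gcd
--
-- def eulertotient(n):
--   return sum(1 for k in range(1,n+1) if gcd(n,k) == 1)
--
-- def iteratedtotient(n0):
--   p = 0
--   n = n0
--   while True:
--     n = eulertotient(n)
--     p += n
--     if n == 1:
--       break
--     if p > n0:
--       break
--   return p
-- ===== SOURCE B (Python) =====
-- def _phi(n):
--     # Euler's totient via the prime-factorization product formula (trial division to sqrt n).
--     if n <= 0:
--         return 0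
--     r = n
--     d = 2
--     while d * d <= n:
--         if n % d == 0:
--             while n % d == 0:
--                 n //= d
--             r -= r // d
--         d += 1
--     if n > 1:
--         r -= r // n
--     return r
--
-- def iteratedtotient(n0):
--     p = 0
--     n = n0
--     while True:
--         n = _phi(n)
--         p += n
--         if n == 1 or p > n0:
--             return p
-- ===== Notes on version B (the rewrite author's own statement) =====
-- stated objective: faster
-- what changed: Each totient is computed by the prime-factorization product formula with trial division up to sqrt(n), instead of counting all k in 1..n with gcd(n,k)=1.
import Mathlib
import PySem

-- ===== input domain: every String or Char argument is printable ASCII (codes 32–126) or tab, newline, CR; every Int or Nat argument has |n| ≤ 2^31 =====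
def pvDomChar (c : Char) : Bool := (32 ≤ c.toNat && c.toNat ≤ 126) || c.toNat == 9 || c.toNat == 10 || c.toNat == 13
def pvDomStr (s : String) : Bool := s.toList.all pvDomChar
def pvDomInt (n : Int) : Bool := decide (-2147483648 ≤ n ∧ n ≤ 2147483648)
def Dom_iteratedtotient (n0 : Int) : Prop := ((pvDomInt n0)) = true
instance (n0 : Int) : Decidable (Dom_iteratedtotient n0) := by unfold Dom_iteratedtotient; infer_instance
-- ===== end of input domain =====

-- B replaces A's O(n)-gcd-count totient by the prime-factorization product formula
-- (trial division up to sqrt n) — an asymptotically faster exact totient.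

-- ===== PORT A =====
-- sum(1 for k in range(1, n+1) if gcd(n, k) == 1)
def eulertotient (n : Int) : Int :=
  (PySem.List.pyRange 1 (n + 1) 1).foldl
    (fun acc k => if Int.gcd n k = 1 then acc + 1 else acc) 0

-- the 'while True' loop of A; the fuel only makes the recursion total
-- (it is large enough on every input on which the Python loop terminates)
def itLoopA (fuel : Nat) (n0 p n : Int) : Int :=
  match fuel with
  | 0 => p
  | f + 1 =>
    let n' := eulertotient n
    let p' := p + n'
    if n' = 1 then p'
    else if p' > n0 then p'
    else itLoopA f n0 p' n'

def iteratedtotient (n0 : Int) : Int := itLoopA (n0.toNat + 1) n0 0 n0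

-- ===== PORT B =====
-- inner 'while n % d == 0: n //= d' of _phi; fuel (current n) only makes it total
def phiStrip (fuel : Nat) (n d : Int) : Int :=
  match fuel with
  | 0 => n
  | f + 1 =>
    if PySem.Int.mod n d = 0 then phiStrip f (PySem.Int.floordiv n d) d else n

-- outer 'while d * d <= n' of _phi, returning the final (r, n); fuel only makes it total
def phiLoop (fuel : Nat) (r n d : Int) : Int × Int :=
  match fuel with
  | 0 => (r, n)
  | f + 1 =>
    if d * d ≤ n then
      if PySem.Int.mod n d = 0 then
        phiLoop f (r - PySem.Int.floordiv r d) (phiStrip n.toNat n d) (d + 1)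
      else phiLoop f r n (d + 1)
    else (r, n)

-- trailing 'if n > 1: r -= r // n'
def phiFinish (rn : Int × Int) : Int :=
  if 1 < rn.2 then rn.1 - PySem.Int.floordiv rn.1 rn.2 else rn.1

def phiB (n : Int) : Int :=
  if n ≤ 0 then 0 else phiFinish (phiLoop (n.toNat + 2) n n 2)

-- the 'while True' loop of B
def itLoopB (fuel : Nat) (n0 p n : Int) : Int :=
  match fuel with
  | 0 => p
  | f + 1 =>
    let n' := phiB n
    let p' := p + n'
    if n' = 1 ∨ p' > n0 then p' else itLoopB f n0 p' n'

def iteratedtotient_alt (n0 : Int) : Int := itLoopB (n0.toNat + 1) n0 0 n0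

-- ===== PRECONDITION & SPEC =====
def Spec_iteratedtotient (n0 : Int) (out : Int) : Prop := out = iteratedtotient_alt n0
instance (n0 : Int) (out : Int) : Decidable (Spec_iteratedtotient n0 out) := by unfold Spec_iteratedtotient; infer_instance

-- ===== CLAIM (what is proved, stated in full; the proofs are below) =====
def Claim_equal_iteratedtotient : Prop := ∀ (n0 : Int), Dom_iteratedtotient n0 → Spec_iteratedtotient n0 (iteratedtotient n0)

-- ===== LEMMAS AND PROOFS =====

-- A's totient counter equals Nat.totient, stated over List.countP.
lemma totient_eq_countP (m : Nat) :
    Nat.totient m = List.countP (fun k => decide (Nat.gcd m k = 1)) (List.range m) := by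
  rw [Nat.totient, Finset.card_filter]
  have key : ∀ j : Nat, (∑ i ∈ Finset.range j, if m.Coprime i then 1 else 0)
      = List.countP (fun k => decide (Nat.gcd m k = 1)) (List.range j) := by
    intro j
    induction j with
    | zero => simp
    | succ t ih =>
        rw [Finset.sum_range_succ, List.range_succ, List.countP_append, ih]
        simp [Nat.Coprime]
  exact key m

-- shift: counting k ∈ [1, m] coprime to m equals counting k ∈ [0, m) coprime to m (m ≥ 1)
lemma countP_shift (m : Nat) (hm : 1 ≤ m) :
    List.countP (fun k => decide (Nat.gcd m (1 + k) = 1)) (List.range m) = Nat.totient m := by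
  obtain ⟨t, rfl⟩ : ∃ t, m = t + 1 := ⟨m - 1, by omega⟩
  have e1 : (fun k => decide (Nat.gcd (t+1) (1 + k) = 1))
      = (fun k => decide (Nat.gcd (t+1) (k + 1) = 1)) := by
    funext k; rw [Nat.add_comm 1 k]
  have e2 : ((fun k => decide (Nat.gcd (t+1) k = 1)) ∘ Nat.succ)
      = (fun k => decide (Nat.gcd (t+1) (k + 1) = 1)) := by
    funext k; simp [Function.comp, Nat.succ_eq_add_one]
  rw [List.range_succ, List.countP_append, e1, totient_eq_countP, List.range_succ_eq_map]
  simp only [List.countP_cons, List.countP_map, List.countP_nil, e2]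
  by_cases ht : t = 0 <;>
    simp [ht, Nat.gcd_self, Nat.gcd_zero_right]

-- A-side characterization
lemma eulertotient_pos (n : Int) (hn : 0 < n) :
    eulertotient n = (Nat.totient n.toNat : Int) := by
  obtain ⟨m, rfl⟩ : ∃ m : Nat, n = (m : Int) := ⟨n.toNat, (Int.toNat_of_nonneg (by omega)).symm⟩
  unfold eulertotient
  rw [PySem.List.foldl_ite_add_one, PySem.List.pyRange_one, List.countP_map]
  have h1 : ((m : Int) + 1 - 1).toNat = m := by omega
  rw [h1]
  have e : ((fun k => decide (Int.gcd (m:Int) k = 1)) ∘ (fun k : Nat => (1:Int) + (k:Int)))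
      = (fun k : Nat => decide (Nat.gcd m (1 + k) = 1)) := by
    funext k
    simp [Function.comp]
    rw [show ((1:Int) + (k:Int)) = ((1 + k : Nat) : Int) by push_cast; ring]
    rw [Int.gcd_natCast_natCast]
  rw [e, countP_shift m (by exact_mod_cast hn)]
  simp

lemma eulertotient_nonpos (n : Int) (hn : n ≤ 0) : eulertotient n = 0 := by
  unfold eulertotient
  rw [PySem.List.pyRange_one_eq_nil (by omega)]
  rfl

-- no common prime factor ⇒ coprime
lemma coprime_of_no_common_prime (a b : Nat)
    (h : ∀ p, Nat.Prime p → p ∣ a → p ∣ b → False) : Nat.Coprime a b := by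
  by_cases h1 : Nat.gcd a b = 1
  · exact h1
  · exfalso
    obtain ⟨p, hp, hpd⟩ := Nat.exists_prime_and_dvd h1
    exact h p hp (dvd_trans hpd (Nat.gcd_dvd_left a b))
      (dvd_trans hpd (Nat.gcd_dvd_right a b))

-- a number ≥ 2 all of whose prime factors are ≥ d, and which is < d², is prime
lemma prime_of_factors_ge (n d : Nat) (hn : 2 ≤ n)
    (hfac : ∀ p, Nat.Prime p → p ∣ n → d ≤ p) (hdd : n < d * d) : Nat.Prime n := by
  have hp : Nat.Prime n.minFac := Nat.minFac_prime (by omega)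
  have hdp : d ≤ n.minFac := hfac _ hp (Nat.minFac_dvd n)
  obtain ⟨q, hq⟩ := Nat.minFac_dvd n
  have hq0 : q ≠ 0 := by rintro rfl; omega
  by_cases hq1 : q = 1
  · rw [hq, hq1, mul_one]; exact hp
  · have hqp : Nat.Prime q.minFac := Nat.minFac_prime hq1
    have hqdvd : q ∣ n := by rw [hq]; exact dvd_mul_left q n.minFac
    have hdq : d ≤ q.minFac := hfac _ hqp (dvd_trans (Nat.minFac_dvd q) hqdvd)
    have hle : q.minFac ≤ q := Nat.minFac_le (by omega)
    have : d * d ≤ n := by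
      calc d * d ≤ n.minFac * q.minFac := Nat.mul_le_mul hdp hdq
        _ ≤ n.minFac * q := Nat.mul_le_mul_left _ hle
        _ = n := hq.symm
    omega

-- the inner strip loop: factors out all powers of d
lemma phiStrip_spec (fuel : Nat) : ∀ (n d : Nat), 2 ≤ d → 1 ≤ n → n ≤ fuel →
    ∃ e s : Nat, phiStrip fuel (n : Int) (d : Int) = (s : Int) ∧
      n = d ^ e * s ∧ ¬ d ∣ s ∧ 1 ≤ s ∧ (d ∣ n → 1 ≤ e) := by
  induction fuel with
  | zero => intro n d hd hn hf; omega
  | succ f ih =>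
      intro n d hd hn hf
      rw [phiStrip]
      by_cases hdvd : d ∣ n
      · obtain ⟨k, hk⟩ := hdvd
        have hmod : n % d = 0 := by rw [hk]; exact Nat.mul_mod_right d k
        rw [PySem.Int.mod_natCast, hmod, PySem.Int.floordiv_natCast]
        rw [if_pos (by norm_num)]
        have hdvd : d ∣ n := ⟨k, hk⟩
        have hq1 : 1 ≤ n / d := Nat.div_pos (Nat.le_of_dvd (by omega) hdvd) (by omega)
        have hlt : n / d < n := Nat.div_lt_self (by omega) (by omega)
        obtain ⟨e, s, heq, hfact, hnd, hs, _⟩ := ih (n / d) d hd hq1 (by omega)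
        refine ⟨e + 1, s, heq, ?_, hnd, hs, fun _ => by omega⟩
        calc n = n / d * d := (Nat.div_mul_cancel hdvd).symm
          _ = d ^ e * s * d := by rw [hfact]
          _ = d ^ (e + 1) * s := by ring
      · have hmod : ¬ (n % d = 0) := fun h => hdvd (Nat.dvd_of_mod_eq_zero h)
        rw [PySem.Int.mod_natCast, if_neg (by exact_mod_cast hmod)]
        exact ⟨0, n, rfl, by ring, hdvd, hn, fun h => absurd h hdvd⟩

-- the trailing step, once d*d > n
lemma phiFinish_spec (r n m d : Nat) (_hd : 2 ≤ d) (hn : 1 ≤ n) (_hm : 1 ≤ m)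
    (hr : r = Nat.totient m * n)
    (hfac : ∀ p, Nat.Prime p → p ∣ n → d ≤ p) (hdd : n < d * d) :
    phiFinish ((r : Int), (n : Int)) = ((Nat.totient m * Nat.totient n : Nat) : Int) := by
  unfold phiFinish
  by_cases h1 : n = 1
  · subst h1
    rw [if_neg (by norm_num), hr]
    simp [Nat.totient_one]
  · have hn2 : 2 ≤ n := by omega
    have hp : Nat.Prime n := prime_of_factors_ge n d hn2 hfac hdd
    rw [if_pos (by simp; exact_mod_cast hn2), hr]
    rw [PySem.Int.floordiv_natCast]
    have hdivc : Nat.totient m * n / n = Nat.totient m := Nat.mul_div_cancel _ (by omega)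
    rw [hdivc]
    rw [Nat.totient_prime hp]
    have hms : Nat.totient m * (n - 1) = Nat.totient m * n - Nat.totient m := by
      rw [Nat.mul_sub, Nat.mul_one]
    rw [hms, Nat.cast_sub (Nat.le_mul_of_pos_right _ (by omega))]

-- main invariant of the trial-division loop
lemma phiLoop_spec (fuel : Nat) : ∀ (r n d m : Nat), 2 ≤ d → 1 ≤ n → 1 ≤ m →
    r = Nat.totient m * n →
    (∀ p, Nat.Prime p → p ∣ n → d ≤ p) →
    (∀ p, Nat.Prime p → p ∣ m → p < d) →
    n < fuel + d - 1 →
    phiFinish (phiLoop fuel (r : Int) (n : Int) (d : Int)) =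
      ((Nat.totient m * Nat.totient n : Nat) : Int) := by
  induction fuel with
  | zero =>
      intro r n d m hd hn hm hr hnf hmf hfuel
      rw [phiLoop]
      have hdd : n < d * d := by
        have : d ≤ d * d := Nat.le_mul_of_pos_left d (by omega)
        omega
      exact phiFinish_spec r n m d hd hn hm hr hnf hdd
  | succ f ih =>
      intro r n d m hd hn hm hr hnf hmf hfuel
      rw [phiLoop]
      by_cases hdd : d * d ≤ n
      · rw [if_pos (by exact_mod_cast hdd)]
        by_cases hdvd : d ∣ n
        · -- d divides n: d is prime; strip all powers of d
          obtain ⟨k, hk⟩ := hdvd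
          have hmod : n % d = 0 := by rw [hk]; exact Nat.mul_mod_right d k
          rw [PySem.Int.mod_natCast, hmod, if_pos (by norm_num)]
          rw [show ((n : Int)).toNat = n from Int.toNat_natCast n]
          obtain ⟨e, s, heq, hfact, hnds, hs, he1⟩ := phiStrip_spec n n d hd hn (le_refl n)
          have he : 1 ≤ e := he1 ⟨k, hk⟩
          rw [heq, PySem.Int.floordiv_natCast]
          have hdprime : Nat.Prime d := by
            have hp : Nat.Prime d.minFac := Nat.minFac_prime (by omega)
            have h1 : d.minFac ∣ n := dvd_trans (Nat.minFac_dvd d) ⟨k, hk⟩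
            have h2 : d ≤ d.minFac := hnf _ hp h1
            have h3 : d.minFac ≤ d := Nat.minFac_le (by omega)
            have h4 : d.minFac = d := by omega
            rwa [h4] at hp
          have hd0 : 0 < d := by omega
          -- arithmetic on r
          have hre : r = (Nat.totient m * (d ^ (e-1) * s)) * d := by
            rw [hr, hfact, show d ^ e = d ^ (e-1) * d by
              rw [← pow_succ]; congr 1; omega]
            ring
          have hrd : r / d = Nat.totient m * (d ^ (e-1) * s) := by
            rw [hre, Nat.mul_div_cancel _ hd0]
          have hrsub : r - r / d = Nat.totient (m * d ^ e) * s := by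
            rw [Nat.totient_mul (by
              apply coprime_of_no_common_prime
              intro p hp hpm hpde
              have hpd : p ∣ d := hp.dvd_of_dvd_pow hpde
              have : p = d := (Nat.prime_dvd_prime_iff_eq hp hdprime).mp hpd
              have := hmf p hp hpm
              omega)]
            rw [Nat.totient_prime_pow hdprime he]
            rw [hrd, hre]
            rw [show Nat.totient m * (d ^ (e-1) * s) * d - Nat.totient m * (d ^ (e-1) * s)
                = (Nat.totient m * (d ^ (e-1) * s)) * (d - 1) from by
              rw [Nat.mul_sub, Nat.mul_one]]
            ring
          -- coprimality d^e with s, and n = d^e * s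
          have hcop2 : Nat.Coprime (d ^ e) s := by
            apply coprime_of_no_common_prime
            intro p hp hpde hps
            have hpd : p ∣ d := hp.dvd_of_dvd_pow hpde
            have : p = d := (Nat.prime_dvd_prime_iff_eq hp hdprime).mp hpd
            exact hnds (this ▸ hps)
          have hsdvd : s ∣ n := ⟨d ^ e, by rw [hfact]; ring⟩
          have hsle : s ≤ n := Nat.le_of_dvd (by omega) hsdvd
          -- apply the induction hypothesis
          rw [show ((r : Int) - ((r / d : Nat) : Int)) = ((r - r / d : Nat) : Int) from by
            rw [Nat.cast_sub (Nat.div_le_self r d)]]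
          rw [show ((d : Int) + 1) = ((d + 1 : Nat) : Int) from by push_cast; ring]
          rw [ih (r - r / d) s (d + 1) (m * d ^ e) (by omega) hs
            (Nat.mul_pos (by omega) (Nat.pow_pos (by omega)))
            (by rw [hrsub])
            (by
              intro p hp hps
              have h1 : d ≤ p := hnf p hp (dvd_trans hps hsdvd)
              have h2 : p ≠ d := by rintro rfl; exact hnds hps
              omega)
            (by
              intro p hp hpm'
              rcases (Nat.Prime.dvd_mul hp).mp hpm' with h | h
              · have := hmf p hp h; omega
              · have hpd : p ∣ d := hp.dvd_of_dvd_pow h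
                have : p = d := (Nat.prime_dvd_prime_iff_eq hp hdprime).mp hpd
                omega)
            (by omega)]
          -- reassemble the totients
          congr 1
          rw [Nat.totient_mul (by
            apply coprime_of_no_common_prime
            intro p hp hpm hpde
            have hpd : p ∣ d := hp.dvd_of_dvd_pow hpde
            have : p = d := (Nat.prime_dvd_prime_iff_eq hp hdprime).mp hpd
            have := hmf p hp hpm
            omega)]
          rw [hfact, Nat.totient_mul hcop2]
          ring
        · -- d does not divide n: just move to d + 1
          have hmod : ¬ (n % d = 0) := fun h => hdvd (Nat.dvd_of_mod_eq_zero h)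
          rw [PySem.Int.mod_natCast, if_neg (by exact_mod_cast hmod)]
          rw [show ((d : Int) + 1) = ((d + 1 : Nat) : Int) from by push_cast; ring]
          exact ih r n (d + 1) m (by omega) hn hm hr
            (by
              intro p hp hps
              have h1 : d ≤ p := hnf p hp hps
              have h2 : p ≠ d := by rintro rfl; exact hdvd hps
              omega)
            (fun p hp hpm => by have := hmf p hp hpm; omega)
            (by omega)
      · rw [if_neg (by exact_mod_cast hdd)]
        exact phiFinish_spec r n m d hd hn hm hr hnf (by omega)

lemma phiB_pos (n : Int) (hn : 0 < n) : phiB n = (Nat.totient n.toNat : Int) := by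
  obtain ⟨nn, rfl⟩ : ∃ m : Nat, n = (m : Int) := ⟨n.toNat, (Int.toNat_of_nonneg (by omega)).symm⟩
  have hnn : 1 ≤ nn := by exact_mod_cast hn
  unfold phiB
  rw [if_neg (by omega)]
  rw [show ((nn : Int)).toNat = nn from Int.toNat_natCast nn]
  rw [show (2 : Int) = ((2 : Nat) : Int) from rfl]
  rw [phiLoop_spec (nn + 2) nn nn 2 1 (by omega) hnn (by omega)
    (by simp [Nat.totient_one])
    (fun p hp _ => hp.two_le)
    (fun p hp hpm => absurd (Nat.dvd_one.mp hpm) hp.ne_one)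
    (by omega)]
  simp [Nat.totient_one]

lemma phiB_nonpos (n : Int) (hn : n ≤ 0) : phiB n = 0 := by
  unfold phiB
  rw [if_pos hn]

-- the two totient implementations agree on every Int
lemma tot_eq (n : Int) : eulertotient n = phiB n := by
  by_cases hn : n ≤ 0
  · rw [eulertotient_nonpos n hn, phiB_nonpos n hn]
  · rw [eulertotient_pos n (by omega), phiB_pos n (by omega)]

lemma loops_eq (fuel : Nat) : ∀ (n0 p n : Int),
    itLoopA fuel n0 p n = itLoopB fuel n0 p n := by
  induction fuel with
  | zero => intro n0 p n; rfl
  | succ f ih =>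
      intro n0 p n
      simp only [itLoopA, itLoopB, tot_eq]
      split_ifs <;> first | rfl | tauto

-- ===== VERDICT (by name: the statement is the Claim_ definition above) =====
theorem iteratedtotient_spec : Claim_equal_iteratedtotient := by
  intro n0 _
  unfold Spec_iteratedtotient iteratedtotient iteratedtotient_alt
  exact loops_eq _ n0 0 n0
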